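-- pv_equiv track=rewrite | github.com/MrBrantCode/unitest_baseline | mut_generate/mist_train_cf/cf_83648/solution.py | f
-- ===== SOURCE A (Python) =====
-- def f(n):
--     if n % 4:
--         return 0
--     n //= 4
--     fact = [1]
--     for i in range(1, n+1):
--         fact.append(fact[-1]*i)
--     res = 0
--     for i in range(1, n):
--         for j in range(1, n-i+1):
--             k = n-i-j
--             res += fact[n]*64*fact[n-1]//(fact[i]*fact[j]*fact[k])
--     return res * 4
-- ===== SOURCE B (Python) =====
-- def f(n):
--     if n % 4:
--         return 0
--     m = n // 4
--     if m < 1: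
--         return 0
--     fact = 1
--     for i in range(1, m):
--         fact *= i
--     return 256 * fact * (3**m - 2**(m+1) + 1)
-- ===== Notes on version B (the rewrite author's own statement) =====
-- stated objective: alternative
-- what changed: Replaces the double loop summing multinomial terms fact[m]*64*fact[m-1]//(fact[i]*fact[j]*fact[k]) by the inclusion-exclusion closed form 256*(m-1)!*(3^m - 2^(m+1) + 1), computing just one factorial product.
import Mathlib
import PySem

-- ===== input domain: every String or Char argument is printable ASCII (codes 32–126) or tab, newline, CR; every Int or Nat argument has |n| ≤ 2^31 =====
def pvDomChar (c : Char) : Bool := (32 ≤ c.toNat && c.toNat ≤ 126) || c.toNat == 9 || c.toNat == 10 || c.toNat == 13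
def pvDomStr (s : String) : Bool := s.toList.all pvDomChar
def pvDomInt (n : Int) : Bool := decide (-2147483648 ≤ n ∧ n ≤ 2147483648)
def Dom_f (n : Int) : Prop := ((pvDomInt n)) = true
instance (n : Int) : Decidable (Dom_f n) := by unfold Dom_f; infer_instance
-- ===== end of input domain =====

-- B replaces A's double loop summing multinomial terms by the closed form
-- 256·(m-1)!·(3^m − 2^(m+1) + 1), obtained by inclusion–exclusion on the inner double sum.

-- ===== PORT A =====
def f (n : Int) : Int :=
  if PySem.Int.mod n 4 ≠ 0 then 0
  else
    let m := PySem.Int.floordiv n 4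
    let fact := (PySem.List.pyRange 1 (m + 1) 1).foldl
      (fun acc i => acc ++ [PySem.List.pyGetD acc (-1) 0 * i]) [(1 : Int)]
    let res := (PySem.List.pyRange 1 m 1).foldl (fun res i =>
      (PySem.List.pyRange 1 (m - i + 1) 1).foldl (fun res j =>
        let k := m - i - j
        res + PySem.Int.floordiv
          (PySem.List.pyGetD fact m 0 * 64 * PySem.List.pyGetD fact (m - 1) 0)
          (PySem.List.pyGetD fact i 0 * PySem.List.pyGetD fact j 0 * PySem.List.pyGetD fact k 0)) res) 0
    res * 4

-- ===== PORT B =====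
def f_alt (n : Int) : Int :=
  if PySem.Int.mod n 4 ≠ 0 then 0
  else
    let m := PySem.Int.floordiv n 4
    if m < 1 then 0
    else
      let fact := (PySem.List.pyRange 1 m 1).foldl (fun acc i => acc * i) 1
      256 * fact * (3 ^ m.toNat - 2 ^ (m.toNat + 1) + 1)

-- ===== PRECONDITION & SPEC =====
def Spec_f (n : Int) (out : Int) : Prop := out = f_alt n
instance (n : Int) (out : Int) : Decidable (Spec_f n out) := by unfold Spec_f; infer_instance

-- ===== CLAIM (what is proved, stated in full; the proofs are below) =====
def Claim_equal_f : Prop := ∀ (n : Int), Dom_f n → Spec_f n (f n)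

-- ===== LEMMAS AND PROOFS =====

-- bridge: a sum over a mapped List.range is the Finset.range sum (definitional)
theorem pv_sum_range (n : Nat) (g : Nat → Int) :
    ((List.range n).map g).sum = ∑ i ∈ Finset.range n, g i := rfl

-- B's running product over range(1, m) is (M−1)!
theorem pv_prod (M : Nat) (hM : 1 ≤ M) :
    (PySem.List.pyRange 1 (M : Int) 1).foldl (fun acc i => acc * i) 1
    = (Nat.factorial (M - 1) : Int) := by
  induction M with
  | zero => omega
  | succ M ih =>
    rcases Nat.eq_or_lt_of_le hM with h | h
    · simp [← h, PySem.List.pyRange_one_eq_nil]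
    · have hM1 : 1 ≤ M := by omega
      rw [show ((M + 1 : Nat) : Int) = (M : Int) + 1 by push_cast; ring,
        PySem.List.pyRange_one_succ_right (by exact_mod_cast hM1),
        List.foldl_append, ih hM1]
      simp only [List.foldl]
      rw [show M + 1 - 1 = (M - 1) + 1 by omega, Nat.factorial_succ]
      push_cast [Nat.sub_add_cancel hM1]
      ring

-- the factorial table A builds is [0!, 1!, …, M!]
theorem pv_fact_build (M : Nat) :
    (PySem.List.pyRange 1 ((M : Int) + 1) 1).foldl
      (fun acc i => acc ++ [PySem.List.pyGetD acc (-1) 0 * i]) [(1 : Int)]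
    = (List.range (M + 1)).map (fun i => (Nat.factorial i : Int)) := by
  induction M with
  | zero => simp [PySem.List.pyRange_one_eq_nil]
  | succ M ih =>
    rw [show ((M + 1 : Nat) : Int) + 1 = ((M : Int) + 1) + 1 by push_cast; ring,
      PySem.List.pyRange_one_succ_right (by omega : (1:Int) ≤ (M:Int)+1),
      List.foldl_append, ih]
    simp only [List.foldl]
    rw [List.range_succ (n := M + 1), List.map_append]
    rw [show (List.range (M+1)).map (fun i => (Nat.factorial i : Int))
        = (List.range M).map (fun i => (Nat.factorial i : Int)) ++ [(Nat.factorial M : Int)] by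
      rw [List.range_succ]; simp]
    rw [PySem.List.pyGetD_neg_one_append_singleton]
    simp [Nat.factorial_succ]
    ring

-- lookups in the factorial table
theorem pv_fact_get (M i : Nat) (h : i ≤ M) :
    PySem.List.pyGetD ((List.range (M + 1)).map (fun i => (Nat.factorial i : Int))) (i : Int) 0
    = (Nat.factorial i : Int) := by
  rw [PySem.List.pyGetD_natCast, List.getD_eq_getElem?_getD]
  simp [Nat.lt_succ_of_le h]

-- each term of A's double loop: the exact division collapses to 64·(M−1)!·C(M,i)·C(M−i,j)
theorem pv_term (M i j : Nat) (hj : 1 ≤ j) (hij : i + j ≤ M) :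
    PySem.Int.floordiv ((Nat.factorial M : Int) * 64 * (Nat.factorial (M - 1) : Int))
      ((Nat.factorial i : Int) * (Nat.factorial j : Int) * (Nat.factorial (M - i - j) : Int))
    = 64 * (Nat.factorial (M - 1) : Int) * (M.choose i : Int) * ((M - i).choose j : Int) := by
  have h1 : M.choose i * i.factorial * (M - i).factorial = M.factorial :=
    Nat.choose_mul_factorial_mul_factorial (by omega)
  have h2 : (M - i).choose j * j.factorial * ((M - i) - j).factorial = (M - i).factorial :=
    Nat.choose_mul_factorial_mul_factorial (by omega)
  have hd : (0 : Int) < (Nat.factorial i : Int) * (Nat.factorial j : Int) * (Nat.factorial (M - i - j) : Int) := by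
    positivity
  have hnum : (Nat.factorial M : Int) * 64 * (Nat.factorial (M - 1) : Int)
      = ((Nat.factorial i : Int) * (Nat.factorial j : Int) * (Nat.factorial (M - i - j) : Int))
        * (64 * (Nat.factorial (M - 1) : Int) * (M.choose i : Int) * ((M - i).choose j : Int)) := by
    rw [show M - i - j = (M - i) - j from rfl]
    rw [← h1, ← h2]
    push_cast
    ring
  rw [hnum, PySem.Int.floordiv_eq_ediv_of_pos hd, Int.mul_ediv_cancel_left _ (by omega)]

-- inner binomial sum: ∑_{j=1}^{t} C(t,j) = 2^t − 1
theorem pv_inner_sum (t : Nat) :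
    (∑ j ∈ Finset.range t, ((t.choose (j + 1) : Int))) = 2 ^ t - 1 := by
  have h : (∑ j ∈ Finset.range t, t.choose (j + 1)) + t.choose 0 = 2 ^ t := by
    rw [← Finset.sum_range_succ']
    exact Nat.sum_range_choose t
  have := congrArg (Nat.cast (R := Int)) h
  push_cast [Nat.choose_zero_right] at this
  linarith

-- outer binomial sum: ∑_{i=1}^{M−1} C(M,i)·(2^{M−i} − 1) = 3^M − 2^{M+1} + 1
theorem pv_outer_sum (M : Nat) (hM : 1 ≤ M) :
    (∑ i ∈ Finset.range (M - 1), ((M.choose (i + 1) : Int)) * (2 ^ (M - (i + 1)) - 1))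
    = 3 ^ M - 2 ^ (M + 1) + 1 := by
  have hT : (∑ k ∈ Finset.range (M + 1), ((M.choose k : Int)) * 2 ^ (M - k)) = 3 ^ M := by
    have := add_pow (1 : Int) 2 M
    norm_num at this
    rw [this]
    apply Finset.sum_congr rfl
    intro k _
    ring
  have hsplit1 : (∑ k ∈ Finset.range (M + 1), ((M.choose k : Int)) * 2 ^ (M - k))
      = 2 ^ M + ((∑ i ∈ Finset.range (M - 1), ((M.choose (i + 1) : Int)) * 2 ^ (M - (i + 1))) + 1) := by
    rw [Finset.sum_range_succ' (fun k => ((M.choose k : Int)) * 2 ^ (M - k)) M]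
    rw [show M = (M - 1) + 1 by omega]
    rw [Finset.sum_range_succ]
    simp [show (M-1)+1 = M by omega, Nat.choose_self]
    ring
  have hC : (∑ i ∈ Finset.range (M - 1), ((M.choose (i + 1) : Int))) = 2 ^ M - 2 := by
    have h : (∑ i ∈ Finset.range (M + 1), M.choose i) = 2 ^ M := Nat.sum_range_choose M
    rw [Finset.sum_range_succ' (fun k => M.choose k) M] at h
    rw [show M = (M - 1) + 1 by omega, Finset.sum_range_succ] at h
    have := congrArg (Nat.cast (R := Int)) h
    push_cast [show (M-1)+1 = M by omega, Nat.choose_self, Nat.choose_zero_right] at this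
    linarith
  have hexp : (∑ i ∈ Finset.range (M - 1), ((M.choose (i + 1) : Int)) * (2 ^ (M - (i + 1)) - 1))
      = (∑ i ∈ Finset.range (M - 1), ((M.choose (i + 1) : Int)) * 2 ^ (M - (i + 1)))
        - (∑ i ∈ Finset.range (M - 1), ((M.choose (i + 1) : Int))) := by
    rw [← Finset.sum_sub_distrib]
    apply Finset.sum_congr rfl
    intro k _
    ring
  rw [hexp, hC]
  have : (∑ i ∈ Finset.range (M - 1), ((M.choose (i + 1) : Int)) * 2 ^ (M - (i + 1)))
      = 3 ^ M - 2 ^ M - 1 := by linarith [hT, hsplit1]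
  rw [this]
  ring

-- A's whole double loop over the factorial table equals 64·(M−1)!·(3^M − 2^{M+1} + 1)
theorem pv_A_core (M : Nat) (hM : 1 ≤ M) :
    ((PySem.List.pyRange 1 ((M : Int)) 1).foldl (fun res i =>
      (PySem.List.pyRange 1 ((M : Int) - i + 1) 1).foldl (fun res j =>
        res + PySem.Int.floordiv
          (PySem.List.pyGetD ((List.range (M + 1)).map (fun i => (Nat.factorial i : Int))) (M : Int) 0 * 64 *
            PySem.List.pyGetD ((List.range (M + 1)).map (fun i => (Nat.factorial i : Int))) ((M : Int) - 1) 0)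
          (PySem.List.pyGetD ((List.range (M + 1)).map (fun i => (Nat.factorial i : Int))) i 0 *
            PySem.List.pyGetD ((List.range (M + 1)).map (fun i => (Nat.factorial i : Int))) j 0 *
            PySem.List.pyGetD ((List.range (M + 1)).map (fun i => (Nat.factorial i : Int))) ((M : Int) - i - j) 0)) res) 0)
    = 64 * (Nat.factorial (M - 1) : Int) * (3 ^ M - 2 ^ (M + 1) + 1) := by
  rw [PySem.List.pyRange_one 1 (M : Int), show ((M : Int) - 1).toNat = M - 1 by omega, List.foldl_map]
  have hcong : ∀ (res : Int), ∀ k ∈ List.range (M - 1),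
      (PySem.List.pyRange 1 ((M : Int) - (1 + (k : Int)) + 1) 1).foldl (fun res j =>
        res + PySem.Int.floordiv
          (PySem.List.pyGetD ((List.range (M + 1)).map (fun i => (Nat.factorial i : Int))) (M : Int) 0 * 64 *
            PySem.List.pyGetD ((List.range (M + 1)).map (fun i => (Nat.factorial i : Int))) ((M : Int) - 1) 0)
          (PySem.List.pyGetD ((List.range (M + 1)).map (fun i => (Nat.factorial i : Int))) (1 + (k : Int)) 0 *
            PySem.List.pyGetD ((List.range (M + 1)).map (fun i => (Nat.factorial i : Int))) j 0 *
            PySem.List.pyGetD ((List.range (M + 1)).map (fun i => (Nat.factorial i : Int))) ((M : Int) - (1 + (k : Int)) - j) 0)) res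
      = res + 64 * (Nat.factorial (M - 1) : Int) * (M.choose (k + 1) : Int) * (2 ^ (M - (k + 1)) - 1) := by
    intro res k hk
    rw [List.mem_range] at hk
    have ht : (M : Int) - (1 + (k : Int)) + 1 = ((M - 1 - k : Nat) : Int) + 1 := by omega
    rw [ht, PySem.List.pyRange_one 1 (((M - 1 - k : Nat) : Int) + 1),
      show (((M - 1 - k : Nat) : Int) + 1 - 1).toNat = M - 1 - k by omega, List.foldl_map]
    have hcong2 : ∀ (acc : Int), ∀ l ∈ List.range (M - 1 - k),
        acc + PySem.Int.floordiv
          (PySem.List.pyGetD ((List.range (M + 1)).map (fun i => (Nat.factorial i : Int))) (M : Int) 0 * 64 *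
            PySem.List.pyGetD ((List.range (M + 1)).map (fun i => (Nat.factorial i : Int))) ((M : Int) - 1) 0)
          (PySem.List.pyGetD ((List.range (M + 1)).map (fun i => (Nat.factorial i : Int))) (1 + (k : Int)) 0 *
            PySem.List.pyGetD ((List.range (M + 1)).map (fun i => (Nat.factorial i : Int))) (1 + (l : Int)) 0 *
            PySem.List.pyGetD ((List.range (M + 1)).map (fun i => (Nat.factorial i : Int))) ((M : Int) - (1 + (k : Int)) - (1 + (l : Int))) 0)
        = acc + 64 * (Nat.factorial (M - 1) : Int) * (M.choose (k + 1) : Int) * (((M - (k + 1)).choose (l + 1) : Int)) := by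
      intro acc l hl
      rw [List.mem_range] at hl
      rw [show ((M : Int) - 1) = ((M - 1 : Nat) : Int) by omega,
        show (1 + (k : Int)) = ((k + 1 : Nat) : Int) by push_cast; ring,
        show (1 + (l : Int)) = ((l + 1 : Nat) : Int) by push_cast; ring,
        show ((M : Int) - ((k + 1 : Nat) : Int) - ((l + 1 : Nat) : Int)) = ((M - (k + 1) - (l + 1) : Nat) : Int) by push_cast; omega]
      rw [pv_fact_get M M le_rfl, pv_fact_get M (M - 1) (by omega),
        pv_fact_get M (k + 1) (by omega), pv_fact_get M (l + 1) (by omega),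
        pv_fact_get M (M - (k + 1) - (l + 1)) (by omega)]
      rw [pv_term M (k + 1) (l + 1) (by omega) (by omega)]
    rw [PySem.List.foldl_congr_mem _ _ _ _ hcong2, PySem.List.foldl_add, pv_sum_range]
    have hfac : (∑ l ∈ Finset.range (M - 1 - k),
        64 * (Nat.factorial (M - 1) : Int) * (M.choose (k + 1) : Int) * (((M - (k + 1)).choose (l + 1) : Int)))
        = 64 * (Nat.factorial (M - 1) : Int) * (M.choose (k + 1) : Int) *
          (∑ l ∈ Finset.range (M - 1 - k), (((M - (k + 1)).choose (l + 1) : Int))) := by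
      rw [Finset.mul_sum]
    rw [hfac, show M - 1 - k = M - (k + 1) by omega, pv_inner_sum (M - (k + 1))]
  rw [PySem.List.foldl_congr_mem _ _ _ _ hcong, PySem.List.foldl_add, pv_sum_range]
  have : (∑ k ∈ Finset.range (M - 1),
      64 * (Nat.factorial (M - 1) : Int) * (M.choose (k + 1) : Int) * (2 ^ (M - (k + 1)) - 1))
      = 64 * (Nat.factorial (M - 1) : Int) *
        (∑ k ∈ Finset.range (M - 1), (M.choose (k + 1) : Int) * (2 ^ (M - (k + 1)) - 1)) := by
    rw [Finset.mul_sum]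
    apply Finset.sum_congr rfl
    intro k _
    ring
  rw [this, pv_outer_sum M hM]
  ring

-- ===== VERDICT (by name: the statement is the Claim_ definition above) =====
theorem f_spec : Claim_equal_f := by
  unfold Claim_equal_f Spec_f
  intro n _
  unfold f f_alt
  by_cases hmod : PySem.Int.mod n 4 ≠ 0
  · rw [if_pos hmod, if_pos hmod]
  · rw [if_neg hmod, if_neg hmod]
    simp only []
    set m := PySem.Int.floordiv n 4 with hm
    by_cases hlt : m < 1
    · rw [if_pos hlt, PySem.List.pyRange_one_eq_nil (by omega : m ≤ 1)]
      simp
    · rw [if_neg hlt]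
      have hMdef : m = ((m.toNat : Nat) : Int) := by omega
      set M := m.toNat with hMn
      have hM : 1 ≤ M := by omega
      rw [hMdef, pv_fact_build M, pv_A_core M hM, pv_prod M hM]
      ring
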